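-- pv_equiv track=rewrite | github.com/noise-lab/automated-dns-censorship | get_output/get_output.py | get_accuracy_unsupervised
-- ===== SOURCE A (Python) =====
-- def get_accuracy_unsupervised(predictions, y_test):
--     tp = 0
--     fp = 0
--     tn = 0
--     fn = 0
--     for i in range(len(predictions)):
--         if predictions[i]==1:
--             if y_test[i]==0:
--                 tn+=1
--             else:
--                 fn+=1
--         else:
--             if y_test[i]==1:
--                 tp +=1
--             else:
--                 fp+=1
--     return tp,fp,tn,fn
-- ===== SOURCE B (Python) =====
-- def get_accuracy_unsupervised(predictions, y_test):
--     pairs = list(zip(predictions, y_test))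
--     tp = sum(1 for p, y in pairs if p != 1 and y == 1)
--     fp = sum(1 for p, y in pairs if p != 1 and y != 1)
--     tn = sum(1 for p, y in pairs if p == 1 and y == 0)
--     fn = sum(1 for p, y in pairs if p == 1 and y != 0)
--     return tp, fp, tn, fn
-- ===== Notes on version B (the rewrite author's own statement) =====
-- stated objective: simpler
-- what changed: Replaces the single index loop with four mutable counters by zipping the two lists once and computing each of tp/fp/tn/fn as an independent filtered count, with no index arithmetic or branching state.
import Mathlib
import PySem

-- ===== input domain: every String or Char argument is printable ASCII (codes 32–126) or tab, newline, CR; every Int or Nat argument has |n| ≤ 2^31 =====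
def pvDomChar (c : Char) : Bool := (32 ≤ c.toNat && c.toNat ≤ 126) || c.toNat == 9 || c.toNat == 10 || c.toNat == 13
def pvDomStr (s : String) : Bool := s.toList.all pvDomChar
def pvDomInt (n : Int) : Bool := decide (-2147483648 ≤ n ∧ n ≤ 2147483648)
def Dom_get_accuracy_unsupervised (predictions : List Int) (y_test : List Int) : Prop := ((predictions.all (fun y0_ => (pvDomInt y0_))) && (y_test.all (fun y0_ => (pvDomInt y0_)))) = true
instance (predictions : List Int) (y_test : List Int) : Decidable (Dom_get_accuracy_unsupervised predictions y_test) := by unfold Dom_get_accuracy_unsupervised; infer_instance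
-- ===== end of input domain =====

-- B replaces A's single index loop over four mutable counters by one zip and four
-- independent filtered counts (objective: simpler). Equal on Pre_ (y_test at least as long as predictions; elsewhere A raises IndexError).

-- ===== PORT A =====
-- one index loop over range(len(predictions)); y_test[i] is in range on Pre_, so pyGetD is exact there
def get_accuracy_unsupervised (predictions : List Int) (y_test : List Int) : Int × Int × Int × Int :=
  let r := (PySem.List.pyRange 0 predictions.length 1).foldl
    (fun (s : Int × Int × Int × Int) (i : Int) =>
      if PySem.List.pyGetD predictions i 0 == 1 then
        if PySem.List.pyGetD y_test i 0 == 0 then (s.1, s.2.1, s.2.2.1 + 1, s.2.2.2)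
        else (s.1, s.2.1, s.2.2.1, s.2.2.2 + 1)
      else
        if PySem.List.pyGetD y_test i 0 == 1 then (s.1 + 1, s.2.1, s.2.2.1, s.2.2.2)
        else (s.1, s.2.1 + 1, s.2.2.1, s.2.2.2))
    (0, 0, 0, 0)
  r

-- ===== PORT B =====
def get_accuracy_unsupervised_alt (predictions : List Int) (y_test : List Int) : Int × Int × Int × Int :=
  let pairs := predictions.zip y_test
  ((pairs.countP (fun t => t.1 != 1 && t.2 == 1) : Int),
   (pairs.countP (fun t => t.1 != 1 && t.2 != 1) : Int),
   (pairs.countP (fun t => t.1 == 1 && t.2 == 0) : Int),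
   (pairs.countP (fun t => t.1 == 1 && t.2 != 0) : Int))

-- ===== PRECONDITION & SPEC =====
-- A indexes y_test[i] for i < len(predictions): it raises IndexError when y_test is shorter
def Pre_get_accuracy_unsupervised (predictions : List Int) (y_test : List Int) : Prop :=
  predictions.length ≤ y_test.length
instance (predictions : List Int) (y_test : List Int) : Decidable (Pre_get_accuracy_unsupervised predictions y_test) := by
  unfold Pre_get_accuracy_unsupervised; infer_instance
def pvWitness_get_accuracy_unsupervised : List Int × List Int := ([1, 2, 0, 1], [0, 1, 1, 0])

def Spec_get_accuracy_unsupervised (predictions : List Int) (y_test : List Int) (out : Int × Int × Int × Int) : Prop := out = get_accuracy_unsupervised_alt predictions y_test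
instance (predictions : List Int) (y_test : List Int) (out : Int × Int × Int × Int) : Decidable (Spec_get_accuracy_unsupervised predictions y_test out) := by unfold Spec_get_accuracy_unsupervised; infer_instance

-- ===== CLAIM (what is proved, stated in full; the proofs are below) =====
def Claim_equal_get_accuracy_unsupervised : Prop := ∀ (predictions : List Int) (y_test : List Int), Dom_get_accuracy_unsupervised predictions y_test → Pre_get_accuracy_unsupervised predictions y_test → Spec_get_accuracy_unsupervised predictions y_test (get_accuracy_unsupervised predictions y_test)
-- ===== LEMMAS AND PROOFS =====

-- A's loop, run from any accumulator, adds B's four counts componentwise.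
theorem pvLoop_eq (predictions y_test : List Int)
    (h : predictions.length ≤ y_test.length) (s : Int × Int × Int × Int) :
    (PySem.List.pyRange 0 predictions.length 1).foldl
      (fun (s : Int × Int × Int × Int) (i : Int) =>
        if PySem.List.pyGetD predictions i 0 == 1 then
          if PySem.List.pyGetD y_test i 0 == 0 then (s.1, s.2.1, s.2.2.1 + 1, s.2.2.2)
          else (s.1, s.2.1, s.2.2.1, s.2.2.2 + 1)
        else
          if PySem.List.pyGetD y_test i 0 == 1 then (s.1 + 1, s.2.1, s.2.2.1, s.2.2.2)
          else (s.1, s.2.1 + 1, s.2.2.1, s.2.2.2)) s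
    = (s.1 + ((predictions.zip y_test).countP (fun t => t.1 != 1 && t.2 == 1) : Int),
       s.2.1 + ((predictions.zip y_test).countP (fun t => t.1 != 1 && t.2 != 1) : Int),
       s.2.2.1 + ((predictions.zip y_test).countP (fun t => t.1 == 1 && t.2 == 0) : Int),
       s.2.2.2 + ((predictions.zip y_test).countP (fun t => t.1 == 1 && t.2 != 0) : Int)) := by
  induction predictions generalizing y_test s with
  | nil => simp
  | cons p ps ih =>
    cases y_test with
    | nil => simp at h
    | cons y ys =>
      have hcons : PySem.List.pyRange 0 ((p :: ps).length : Int) 1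
          = 0 :: PySem.List.pyRange 1 ((p :: ps).length : Int) 1 := by
        apply PySem.List.pyRange_one_cons; simp
      have hshift : PySem.List.pyRange 1 ((p :: ps).length : Int) 1
          = (PySem.List.pyRange 0 (ps.length : Int) 1).map (fun i => i + 1) := by
        simp [PySem.List.pyRange_one]
        intro a _
        ring
      have hget : ∀ (xs : List Int) (x : Int) (i : Int), 0 ≤ i →
          PySem.List.pyGetD (x :: xs) (i + 1) 0 = PySem.List.pyGetD xs i 0 := by
        intro xs x i hi
        obtain ⟨n, rfl⟩ := Int.eq_ofNat_of_zero_le hi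
        have hc : ((n : Int) + 1) = ((n + 1 : Nat) : Int) := by push_cast; ring
        rw [hc]
        simp [PySem.List.pyGetD]
      rw [hcons]
      simp only [List.foldl_cons, hshift, List.foldl_map]
      have hcongr : ∀ init : Int × Int × Int × Int,
          List.foldl (fun (x : Int × Int × Int × Int) (i : Int) =>
            if PySem.List.pyGetD (p :: ps) (i + 1) 0 == 1 then
              if PySem.List.pyGetD (y :: ys) (i + 1) 0 == 0 then (x.1, x.2.1, x.2.2.1 + 1, x.2.2.2)
              else (x.1, x.2.1, x.2.2.1, x.2.2.2 + 1)
            else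
              if PySem.List.pyGetD (y :: ys) (i + 1) 0 == 1 then (x.1 + 1, x.2.1, x.2.2.1, x.2.2.2)
              else (x.1, x.2.1 + 1, x.2.2.1, x.2.2.2)) init (PySem.List.pyRange 0 (ps.length : Int) 1)
          = List.foldl (fun (x : Int × Int × Int × Int) (i : Int) =>
            if PySem.List.pyGetD ps i 0 == 1 then
              if PySem.List.pyGetD ys i 0 == 0 then (x.1, x.2.1, x.2.2.1 + 1, x.2.2.2)
              else (x.1, x.2.1, x.2.2.1, x.2.2.2 + 1)
            else
              if PySem.List.pyGetD ys i 0 == 1 then (x.1 + 1, x.2.1, x.2.2.1, x.2.2.2)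
              else (x.1, x.2.1 + 1, x.2.2.1, x.2.2.2)) init (PySem.List.pyRange 0 (ps.length : Int) 1) := by
        intro init
        apply PySem.List.foldl_congr_mem
        intro acc i hi
        have h0 : 0 ≤ i := ((PySem.List.mem_pyRange_one).1 hi).1
        rw [hget ps p i h0, hget ys y i h0]
      rw [hcongr, ih ys (by simpa using h)]
      have hp0 : PySem.List.pyGetD (p :: ps) (0 : Int) 0 = p := by
        simp [PySem.List.pyGetD]
      have hy0' : PySem.List.pyGetD (y :: ys) (0 : Int) 0 = y := by
        simp [PySem.List.pyGetD]
      rw [hp0, hy0']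
      simp only [List.zip_cons_cons, List.countP_cons]
      by_cases hp : p = 1 <;> by_cases hy0 : y = 0 <;> by_cases hy1 : y = 1 <;>
        first
          | (exfalso; omega)
          | (simp [hp, hy0, hy1]; push_cast; ring)

-- ===== VERDICT (by name: the statement is the Claim_ definition above) =====
theorem get_accuracy_unsupervised_spec : Claim_equal_get_accuracy_unsupervised := by
  intro predictions y_test _ hpre
  unfold Spec_get_accuracy_unsupervised get_accuracy_unsupervised get_accuracy_unsupervised_alt
  rw [pvLoop_eq predictions y_test hpre]
  simp
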